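-- pv_equiv track=rewrite | github.com/Filakcz/Skola-gchd | Python/5.M/prace_s_retezci.py | sifra
-- ===== SOURCE A (Python) =====
-- def sifra(text):
--     sifra = ""
--     for i in range(len(text)):
--         if ord(text[i]) > 96 and ord(text[i]) < 123:
--             sifra += str((ord(text[i])-96))
--             if i < len(text) - 1 and ord(text[i+1]) > 96 and ord(text[i+1]) < 123:
--                 sifra += "|"
--         else:
--             sifra += (text[i])
--     return sifra
-- ===== SOURCE B (Python) =====
-- def _runs(text):
--     """Split text into maximal runs (is_lower, substring), lowercase = 'a'..'z'."""
--     runs = []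
--     i = 0
--     n = len(text)
--     while i < n:
--         low = 'a' <= text[i] <= 'z'
--         j = i
--         while j < n and (('a' <= text[j] <= 'z') == low):
--             j += 1
--         runs.append((low, text[i:j]))
--         i = j
--     return runs
--
--
-- def sifra(text):
--     return ''.join(
--         '|'.join(str(ord(c) - 96) for c in run) if low else run
--         for low, run in _runs(text)
--     )
-- ===== Notes on version B (the rewrite author's own statement) =====
-- stated objective: idiomatic
-- what changed: B first splits the input into maximal runs of consecutive lowercase vs other characters, then encodes each lowercase run by pipe-joining the per-letter codes and emits other runs verbatim, replacing A's single index loop with a lookahead at text[i+1] and its repeated string concatenation.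
import Mathlib
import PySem

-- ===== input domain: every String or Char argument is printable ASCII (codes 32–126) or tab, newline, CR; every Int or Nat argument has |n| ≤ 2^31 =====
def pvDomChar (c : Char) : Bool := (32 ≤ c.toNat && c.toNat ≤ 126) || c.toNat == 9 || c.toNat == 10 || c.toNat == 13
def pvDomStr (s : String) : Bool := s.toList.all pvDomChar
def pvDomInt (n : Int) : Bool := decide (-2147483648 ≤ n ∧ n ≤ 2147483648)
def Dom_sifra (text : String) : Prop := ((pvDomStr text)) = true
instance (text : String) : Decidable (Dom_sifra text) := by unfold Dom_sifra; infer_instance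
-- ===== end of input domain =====

-- B first splits the input into maximal lowercase/other runs and then joins each lowercase run with '|' (idiomatic two-stage decomposition); return value only.

-- ===== PORT A =====
-- A's index loop with lookahead at text[i+1], as structural recursion on the char list
-- (current char = text[i], head of the rest = text[i+1]; 'i < len-1' = the rest being nonempty).
def sepA : List Char → List Char
  | c2 :: _ => if 96 < c2.toNat && c2.toNat < 123 then ['|'] else []
  | [] => []

def sifraGo : List Char → List Char → List Char
  | acc, [] => acc
  | acc, c :: rest =>
    if 96 < c.toNat && c.toNat < 123 then
      sifraGo (acc ++ PySem.Int.toChars ((c.toNat : Int) - 96) ++ sepA rest) rest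
    else sifraGo (acc ++ [c]) rest

def sifra (text : String) : String := String.ofList (sifraGo [] text.toList)

-- ===== PORT B =====
-- B's inner while loop: take the maximal prefix whose lowercase-ness equals `low`,
-- returning (run taken, remainder) — i.e. text[i:j] and the rest.
def takeRun (low : Bool) : List Char → List Char × List Char
  | [] => ([], [])
  | c :: rest =>
    if ('a' ≤ c && c ≤ 'z') = low then
      let p := takeRun low rest
      (c :: p.1, p.2)
    else ([], c :: rest)

theorem takeRun_snd_length (low : Bool) (l : List Char) :
    (takeRun low l).2.length ≤ l.length := by
  induction l with
  | nil => simp [takeRun]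
  | cons c rest ih =>
    simp only [takeRun]
    split
    · simpa using Nat.le_succ_of_le ih
    · simp

-- B's outer while loop: the list of maximal runs (is_lower, run).
def runsB : List Char → List (Bool × List Char)
  | [] => []
  | c :: rest =>
    ('a' ≤ c && c ≤ 'z', c :: (takeRun ('a' ≤ c && c ≤ 'z') rest).1) ::
      runsB (takeRun ('a' ≤ c && c ≤ 'z') rest).2
termination_by l => l.length
decreasing_by
  exact Nat.lt_succ_of_le (takeRun_snd_length _ rest)

-- encode one run: '|'.join of per-letter codes for a lowercase run, verbatim otherwise
def encRun : Bool × List Char → List Char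
  | (true, cs) => (List.intersperse ['|'] (cs.map (fun c => PySem.Int.toChars ((c.toNat : Int) - 96)))).flatten
  | (false, cs) => cs

def sifra_alt (text : String) : String :=
  String.ofList ((runsB text.toList).map encRun).flatten

-- ===== PRECONDITION & SPEC =====
def Spec_sifra (text : String) (out : String) : Prop := out = sifra_alt text
instance (text : String) (out : String) : Decidable (Spec_sifra text out) := by unfold Spec_sifra; infer_instance

-- ===== CLAIM (what is proved, stated in full; the proofs are below) =====
def Claim_equal_sifra : Prop := ∀ (text : String), Dom_sifra text → Spec_sifra text (sifra text)

-- ===== LEMMAS AND PROOFS =====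

def pvLow (c : Char) : Bool := 96 < c.toNat && c.toNat < 123

def pvHeadLow : List Char → Bool
  | [] => false
  | c :: _ => pvLow c

-- canonical recursive form both ports are reduced to
def pvF : List Char → List Char
  | [] => []
  | c :: rest =>
    if pvLow c then
      PySem.Int.toChars ((c.toNat : Int) - 96) ++ (if pvHeadLow rest then ['|'] else []) ++ pvF rest
    else c :: pvF rest

theorem pvF_cons (c : Char) (rest : List Char) :
    pvF (c :: rest) =
      if pvLow c then
        PySem.Int.toChars ((c.toNat : Int) - 96) ++ (if pvHeadLow rest then ['|'] else []) ++ pvF rest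
      else c :: pvF rest := rfl

theorem pvHeadLow_cons (c : Char) (rest : List Char) : pvHeadLow (c :: rest) = pvLow c := rfl

theorem pvLow_eq (c : Char) : ('a' ≤ c && c ≤ 'z') = pvLow c := by
  rw [Bool.eq_iff_iff]
  simp only [pvLow, Bool.and_eq_true, decide_eq_true_eq]
  simp only [Char.le_def, UInt32.le_iff_toNat_le, Char.toNat_val]
  have ha : 'a'.toNat = 97 := rfl
  have hz : 'z'.toNat = 122 := rfl
  omega

theorem sepA_eq (rest : List Char) :
    sepA rest = (if pvHeadLow rest then ['|'] else []) := by
  cases rest <;> rfl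

theorem sifraGo_append (l : List Char) (acc1 acc2 : List Char) :
    sifraGo (acc1 ++ acc2) l = acc1 ++ sifraGo acc2 l := by
  induction l generalizing acc2 with
  | nil => simp [sifraGo]
  | cons c rest ih =>
    cases h : (96 < c.toNat && c.toNat < 123) with
    | true =>
      simp only [sifraGo, h, if_true, List.append_assoc]
      rw [ih]
    | false =>
      simp only [sifraGo, h, Bool.false_eq_true, if_false, List.append_assoc]
      rw [ih]

theorem sifraGo_prefix (l : List Char) (acc : List Char) :
    sifraGo acc l = acc ++ sifraGo [] l := by
  simpa using sifraGo_append l acc []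

-- A's loop computes pvF
theorem sifraGo_eq_pvF (l : List Char) : sifraGo [] l = pvF l := by
  induction l with
  | nil => rfl
  | cons c rest ih =>
    cases h : pvLow c with
    | true =>
      have hA : (96 < c.toNat && c.toNat < 123) = true := h
      simp only [sifraGo, hA, if_true, List.nil_append, pvF, h]
      rw [sifraGo_prefix, sepA_eq, ih, List.append_assoc]
    | false =>
      have hA : (96 < c.toNat && c.toNat < 123) = false := h
      simp only [sifraGo, hA, Bool.false_eq_true, if_false, List.nil_append, pvF, h]
      rw [sifraGo_prefix, ih]
      simp

-- takeRun facts
theorem takeRun_append (low : Bool) (l : List Char) :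
    (takeRun low l).1 ++ (takeRun low l).2 = l := by
  induction l with
  | nil => rfl
  | cons c rest ih =>
    simp only [takeRun]
    split
    · simpa using ih
    · rfl

theorem takeRun_fst_low (low : Bool) (l : List Char) :
    ∀ d ∈ (takeRun low l).1, pvLow d = low := by
  induction l with
  | nil => simp [takeRun]
  | cons c rest ih =>
    simp only [takeRun]
    split
    · rename_i h
      intro d hd
      rcases List.mem_cons.mp hd with rfl | hd
      · rw [← pvLow_eq]; exact h
      · exact ih d hd
    · simp

theorem takeRun_snd_head (low : Bool) (l : List Char) :
    pvHeadLow (takeRun low l).2 = false ∨ pvHeadLow (takeRun low l).2 = !low := by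
  induction l with
  | nil => left; rfl
  | cons c rest ih =>
    simp only [takeRun]
    split
    · exact ih
    · rename_i h
      right
      simp only [pvHeadLow, ← pvLow_eq]
      cases low <;> simp_all

-- the lowercase-run case: pvF on a lowercase run is the '|'-join of the codes
theorem pvF_low_run (rem : List Char) (hrem : pvHeadLow rem = false) :
    ∀ (r : List Char) (c : Char), pvLow c = true → (∀ d ∈ r, pvLow d = true) →
    pvF (c :: (r ++ rem)) =
      (List.intersperse ['|'] ((c :: r).map (fun d => PySem.Int.toChars ((d.toNat : Int) - 96)))).flatten
        ++ pvF rem := by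
  intro r
  induction r with
  | nil =>
    intro c hc _
    simp only [List.nil_append]
    rw [pvF_cons]
    simp [hc, hrem]
  | cons d r' ih =>
    intro c hc hr
    have hd : pvLow d = true := hr d (List.mem_cons_self)
    have hr' : ∀ e ∈ r', pvLow e = true := fun e he => hr e (List.mem_cons_of_mem _ he)
    have htail := ih d hd hr'
    simp only [List.cons_append]
    rw [pvF_cons]
    simp only [hc, if_true, pvHeadLow_cons, hd]
    rw [htail]
    simp

-- the other-run case: pvF copies a non-lowercase run verbatim
theorem pvF_other_run (rem : List Char) :
    ∀ (r : List Char) (c : Char), pvLow c = false → (∀ d ∈ r, pvLow d = false) →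
    pvF (c :: (r ++ rem)) = (c :: r) ++ pvF rem := by
  intro r
  induction r with
  | nil =>
    intro c hc _
    rw [List.nil_append, pvF_cons]
    simp [hc]
  | cons d r' ih =>
    intro c hc hr
    have hd : pvLow d = false := hr d (List.mem_cons_self)
    have hr' : ∀ e ∈ r', pvLow e = false := fun e he => hr e (List.mem_cons_of_mem _ he)
    have htail := ih d hd hr'
    simp only [List.cons_append]
    rw [pvF_cons]
    simp only [hc, Bool.false_eq_true, if_false]
    rw [htail]
    simp

-- B computes pvF (strong induction on the length, since runsB recurses on the remainder)
theorem runsB_eq_pvF_aux : ∀ (n : Nat) (l : List Char), l.length ≤ n →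
    ((runsB l).map encRun).flatten = pvF l := by
  intro n
  induction n with
  | zero =>
    intro l hl
    have : l = [] := List.eq_nil_of_length_eq_zero (Nat.le_zero.mp hl)
    subst this
    rw [runsB]
    rfl
  | succ n ih =>
    intro l hl
    cases l with
    | nil => rw [runsB]; rfl
    | cons c rest =>
      rw [runsB]
      have hrem_len : (takeRun ('a' ≤ c && c ≤ 'z') rest).2.length ≤ n :=
        le_trans (takeRun_snd_length _ _) (by simpa using Nat.le_of_succ_le_succ hl)
      simp only [List.map_cons, List.flatten_cons, ih _ hrem_len]
      have hlc : pvLow c = ('a' ≤ c && c ≤ 'z') := (pvLow_eq c).symm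
      have hsplit : rest = (takeRun ('a' ≤ c && c ≤ 'z') rest).1 ++ (takeRun ('a' ≤ c && c ≤ 'z') rest).2 :=
        (takeRun_append _ _).symm
      cases hl2 : ('a' ≤ c && c ≤ 'z') with
      | true =>
        rw [hl2] at hlc hsplit
        have hhead : pvHeadLow (takeRun true rest).2 = false := by
          rcases takeRun_snd_head true rest with h | h
          · exact h
          · rw [h]; rfl
        conv_rhs => rw [hsplit]
        rw [pvF_low_run _ hhead _ c hlc (takeRun_fst_low true rest)]
        simp [encRun]
      | false =>
        rw [hl2] at hlc hsplit
        conv_rhs => rw [hsplit]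
        rw [pvF_other_run _ _ c hlc (takeRun_fst_low false rest)]
        simp [encRun]

theorem runsB_eq_pvF (l : List Char) : ((runsB l).map encRun).flatten = pvF l :=
  runsB_eq_pvF_aux l.length l le_rfl

-- ===== VERDICT (by name: the statement is the Claim_ definition above) =====
theorem sifra_spec : Claim_equal_sifra := by
  intro text _
  unfold Spec_sifra sifra sifra_alt
  rw [sifraGo_eq_pvF, runsB_eq_pvF]
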